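-- pv_equiv track=rewrite | github.com/harshitpoddar09/GeeksforGeeks-Solutions | Basic/Missing Characters in Panagram.py | missingPanagram
-- ===== SOURCE A (Python) =====
-- def missingPanagram(s):
--     s=s.lower()
--     a=set('qwertyuioplkjhgfdsazxcvbnm')
--     for i in s:
--         if i in a:
--             a.remove(i)
--     if len(a)==0:
--         return -1
--     return ''.join(sorted(a))
-- ===== SOURCE B (Python) =====
-- def missingPanagram(s):
--     t = s.lower()
--     res = [c for c in 'abcdefghijklmnopqrstuvwxyz' if c not in t]
--     if not res:
--         return -1
--     return ''.join(res)
-- ===== Notes on version B (the rewrite author's own statement) =====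
-- stated objective: faster
-- what changed: B scans the fixed a-z alphabet and keeps each letter absent from s.lower() via a C-level substring test, replacing A's per-character set membership+removal loop and final sort; the kept letters are already in order.
-- outside the precondition, e.g. on missingPanagram('The quick brown fox jumps over the lazy dog'): A returns -1, B returns -1
import Mathlib
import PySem

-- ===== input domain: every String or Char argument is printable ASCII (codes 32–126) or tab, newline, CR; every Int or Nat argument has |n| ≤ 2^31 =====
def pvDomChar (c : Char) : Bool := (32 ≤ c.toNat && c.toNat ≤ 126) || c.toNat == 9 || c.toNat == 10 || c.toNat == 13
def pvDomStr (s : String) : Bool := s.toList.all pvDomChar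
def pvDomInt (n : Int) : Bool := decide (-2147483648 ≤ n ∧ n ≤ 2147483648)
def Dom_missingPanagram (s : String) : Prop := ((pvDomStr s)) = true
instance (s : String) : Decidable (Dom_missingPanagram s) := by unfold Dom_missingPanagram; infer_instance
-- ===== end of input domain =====

-- B scans the fixed a-z alphabet, keeping each letter absent from s.lower(), instead of
-- deleting seen letters from a set and sorting the remainder: simpler, no set and no sort.
-- Return-type note: on pangram inputs the Python programs return the int -1, not a string;
-- those inputs are outside Pre_ and both ports return "-1" there (nothing is claimed).

-- ===== PORT A =====
def missingPanagram (s : String) : String :=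
  -- s = s.lower()
  let t := PySem.Str.lower s
  -- a = set('qwertyuioplkjhgfdsazxcvbnm')
  let a : PySem.Set Char := PySem.Set.ofList "qwertyuioplkjhgfdsazxcvbnm".toList
  -- for i in s: if i in a: a.remove(i)   (remove on a member = discard)
  let a := t.toList.foldl
    (fun a i => if PySem.Set.contains a i then PySem.Set.discard a i else a) a
  -- if len(a)==0: return -1  (int; outside Pre_)
  if PySem.Set.len a = 0 then "-1"
  -- return ''.join(sorted(a))
  else String.ofList (PySem.List.sorted a (fun x => x) false)

-- ===== PORT B =====
def missingPanagram_alt (s : String) : String :=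
  let t := PySem.Str.lower s
  -- res = [c for c in 'abcdefghijklmnopqrstuvwxyz' if c not in t]
  -- ('c not in t' is a one-character substring test = char non-membership: exact)
  let res := "abcdefghijklmnopqrstuvwxyz".toList.filter (fun c => !t.toList.contains c)
  if res = [] then "-1"   -- Python B returns int -1 here; outside Pre_
  else String.ofList res

-- ===== PRECONDITION & SPEC =====
-- Pre_ excludes exactly the pangram inputs: there both Pythons return the int -1,
-- which is not a value of the declared String return type.
def Pre_missingPanagram (s : String) : Prop :=
  ("abcdefghijklmnopqrstuvwxyz".toList.any
    (fun c => !(PySem.Str.lower s).toList.contains c)) = true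
instance (s : String) : Decidable (Pre_missingPanagram s) := by
  unfold Pre_missingPanagram; infer_instance
def pvWitness_missingPanagram : String := ""
def Spec_missingPanagram (s : String) (out : String) : Prop := out = missingPanagram_alt s
instance (s : String) (out : String) : Decidable (Spec_missingPanagram s out) := by unfold Spec_missingPanagram; infer_instance

-- ===== CLAIM (what is proved, stated in full; the proofs are below) =====
def Claim_equal_missingPanagram : Prop := ∀ (s : String), Dom_missingPanagram s → Pre_missingPanagram s → Spec_missingPanagram s (missingPanagram s)

-- ===== LEMMAS AND PROOFS =====

-- A's removal loop, run to the end, leaves exactly the elements of the set not occurring in the list.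
theorem pv_fold_discard (l : List Char) (a : PySem.Set Char) :
    l.foldl (fun a i => if PySem.Set.contains a i then PySem.Set.discard a i else a) a
      = a.filter (fun x => !l.contains x) := by
  induction l generalizing a with
  | nil => simp
  | cons c l ih =>
      simp only [List.foldl_cons, ih]
      by_cases h : PySem.Set.contains a c
      · simp only [h, if_pos]
        simp [PySem.Set.discard, List.filter_filter]
        congr 1
        funext x
        by_cases hx : x = c <;> simp [hx]
      · simp only [h, if_neg, Bool.false_eq_true, not_false_iff]
        have hc : c ∉ a := by
          simpa [PySem.Set.contains_iff] using h
        refine List.filter_congr ?_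
        intro x hx
        have hxc : x ≠ c := fun e => hc (e ▸ hx)
        simp [hxc]

theorem missingPanagram_spec : Claim_equal_missingPanagram := by
  intro s _hd hpre
  unfold Spec_missingPanagram missingPanagram missingPanagram_alt
  simp only [pv_fold_discard, PySem.Str.toList_lower]
  set t := PySem.Chars.lower s.toList with ht
  -- the two filtered lists are a permutation of each other, B's is strictly increasing
  have hperm :
      ("abcdefghijklmnopqrstuvwxyz".toList.filter (fun c => !t.contains c)).Perm
        ((PySem.Set.ofList "qwertyuioplkjhgfdsazxcvbnm".toList).filter (fun x => !t.contains x)) := by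
    refine List.Perm.filter _ ?_
    decide
  have hpair :
      ("abcdefghijklmnopqrstuvwxyz".toList.filter (fun c => !t.contains c)).Pairwise
        (fun a b : Char => a < b) := by
    refine List.Pairwise.filter _ ?_
    decide
  have hsorted :
      PySem.List.sorted
          ((PySem.Set.ofList "qwertyuioplkjhgfdsazxcvbnm".toList).filter (fun x => !t.contains x))
          (fun x => x) false
        = "abcdefghijklmnopqrstuvwxyz".toList.filter (fun c => !t.contains c) :=
    PySem.List.sorted_eq_of_perm_of_pairwise_lt _ _ _ hperm hpair
  -- Pre_ makes both branches take the non-empty arm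
  have hne : "abcdefghijklmnopqrstuvwxyz".toList.filter (fun c => !t.contains c) ≠ [] := by
    unfold Pre_missingPanagram at hpre
    rw [List.any_eq_true] at hpre
    obtain ⟨c, hc, hnc⟩ := hpre
    intro h
    have hmem : c ∈ "abcdefghijklmnopqrstuvwxyz".toList.filter (fun c => !t.contains c) := by
      rw [List.mem_filter]
      exact ⟨hc, by simpa [ht] using hnc⟩
    rw [h] at hmem
    exact absurd hmem List.not_mem_nil
  have hlen : PySem.Set.len
      ((PySem.Set.ofList "qwertyuioplkjhgfdsazxcvbnm".toList).filter (fun x => !t.contains x)) ≠ 0 := by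
    intro h
    have h0 : ((PySem.Set.ofList "qwertyuioplkjhgfdsazxcvbnm".toList).filter (fun x => !t.contains x)) = [] := by
      simp only [PySem.Set.len] at h
      exact List.eq_nil_of_length_eq_zero (by exact_mod_cast h)
    rw [h0] at hperm
    exact hne (List.Perm.eq_nil hperm)
  rw [if_neg hlen, if_neg hne]
  exact congrArg String.ofList hsorted
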